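-- pv_equiv track=rewrite | github.com/tsao100/Kanji-Convert | draw_glyph.py | decode_glyph
-- ===== SOURCE A (Python) =====
-- DIR_TABLE = [
--     (1, 0),   (1, 1),   (0, 1),   (-1, 1),
--     (-1, 0),  (-1, -1), (0, -1),  (1, -1),
--     (2, 0),   (2, 2),   (0, 2),   (-2, 2),
--     (-2, 0),  (-2, -2), (0, -2),  (2, -2),
-- ]
--
-- def decode_glyph(data, offset):
--     x, y = 0, 0
--     path = [(x, y)]
--
--     ptr = offset
--
--     while True:
--         b = data[ptr]
--         ptr += 1
--
--         if b == 0: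
--             break
--
--         length = (b >> 4) & 0xF
--         direction = b & 0xF
--
--         dx, dy = DIR_TABLE[direction]
--         x += dx * length
--         y += dy * length
--
--         path.append((x, y))
--
--     return path
-- ===== SOURCE B (Python) =====
-- DIR_TABLE = [
--     (1, 0),   (1, 1),   (0, 1),   (-1, 1),
--     (-1, 0),  (-1, -1), (0, -1),  (1, -1),
--     (2, 0),   (2, 2),   (0, 2),   (-2, 2),
--     (-2, 0),  (-2, -2), (0, -2),  (2, -2),
-- ]
--
-- def decode_glyph(data, offset):
--     # phase 1: decode the byte stream into a list of (dx, dy) deltas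
--     deltas = []
--     ptr = offset
--     while True:
--         b = data[ptr]
--         ptr += 1
--         if b == 0:
--             break
--         dx, dy = DIR_TABLE[b & 0xF]
--         n = (b >> 4) & 0xF
--         deltas.append((dx * n, dy * n))
--     # phase 2: the path is the running prefix sum of the deltas, seeded at (0, 0)
--     path = [(0, 0)]
--     x, y = 0, 0
--     for dx, dy in deltas:
--         x += dx
--         y += dy
--         path.append((x, y))
--     return path
-- ===== Notes on version B (the rewrite author's own statement) =====
-- stated objective: alternative
-- what changed: B splits A's fused loop into two phases: first decode the byte stream into a list of (dx*len, dy*len) deltas, then build the path as a separate prefix-sum scan over that list seeded at (0,0).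
import Mathlib
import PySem

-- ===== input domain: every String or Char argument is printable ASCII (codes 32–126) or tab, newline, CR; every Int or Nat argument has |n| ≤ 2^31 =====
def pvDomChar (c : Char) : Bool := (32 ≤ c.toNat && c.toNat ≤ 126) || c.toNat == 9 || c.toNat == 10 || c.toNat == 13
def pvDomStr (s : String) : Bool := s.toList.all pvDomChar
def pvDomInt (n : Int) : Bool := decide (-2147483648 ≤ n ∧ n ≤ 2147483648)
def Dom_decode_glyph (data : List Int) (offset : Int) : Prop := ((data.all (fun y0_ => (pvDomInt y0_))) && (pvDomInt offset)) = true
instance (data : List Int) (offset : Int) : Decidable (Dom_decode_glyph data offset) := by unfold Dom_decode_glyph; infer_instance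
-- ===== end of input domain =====

-- One honest line: B separates A's fused decode-and-accumulate loop into a decode phase
-- (byte stream → delta list) followed by a prefix-sum scan; same cost, different decomposition.
-- Pre_ excludes exactly the inputs where the Python (both A and B) raises IndexError:
-- no zero terminator is reachable from offset (Python negative indices wrap, per pyGet?).

def DIR_TABLE : List (Int × Int) := [
  (1, 0),   (1, 1),   (0, 1),   (-1, 1),
  (-1, 0),  (-1, -1), (0, -1),  (1, -1),
  (2, 0),   (2, 2),   (0, 2),   (-2, 2),
  (-2, 0),  (-2, -2), (0, -2),  (2, -2)]

-- ===== PORT A =====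
-- A's while-loop: carries (x, y) and the path, appending each new point as it goes.
-- fuel bounds the loop (2*len+1 covers every terminating run); exhaustion / IndexError
-- branches are outside Pre_.
def decodeGlyphLoopA (data : List Int) : Nat → Int → Int → Int → List (Int × Int) → List (Int × Int)
  | 0, _, _, _, path => path
  | fuel + 1, ptr, x, y, path =>
    match PySem.List.pyGet? data ptr with
    | none => path
    | some b =>
      if b = 0 then path
      else
        let length := PySem.Int.band (b >>> 4) 15
        let direction := PySem.Int.band b 15
        match PySem.List.pyGet? DIR_TABLE direction with
        | none => path
        | some (dx, dy) =>
          decodeGlyphLoopA data fuel (ptr + 1) (x + dx * length) (y + dy * length)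
            (path ++ [(x + dx * length, y + dy * length)])

def decode_glyph (data : List Int) (offset : Int) : List (Int × Int) :=
  decodeGlyphLoopA data (2 * data.length + 1) offset 0 0 [(0, 0)]

-- ===== PORT B =====
-- phase 1: decode the byte stream into a list of deltas
def readDeltas (data : List Int) : Nat → Int → List (Int × Int) → List (Int × Int)
  | 0, _, acc => acc
  | fuel + 1, ptr, acc =>
    match PySem.List.pyGet? data ptr with
    | none => acc
    | some b =>
      if b = 0 then acc
      else
        match PySem.List.pyGet? DIR_TABLE (PySem.Int.band b 15) with
        | none => acc
        | some (dx, dy) =>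
          let n := PySem.Int.band (b >>> 4) 15
          readDeltas data fuel (ptr + 1) (acc ++ [(dx * n, dy * n)])

-- phase 2: prefix-sum scan of the deltas from a running point
def scanDeltas : List (Int × Int) → Int → Int → List (Int × Int)
  | [], _, _ => []
  | (dx, dy) :: rest, x, y => (x + dx, y + dy) :: scanDeltas rest (x + dx) (y + dy)

def decode_glyph_alt (data : List Int) (offset : Int) : List (Int × Int) :=
  (0, 0) :: scanDeltas (readDeltas data (2 * data.length + 1) offset []) 0 0

-- ===== PRECONDITION & SPEC =====
-- Pre_ = the scan reaches a zero byte before running off the list (otherwise Python raises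
-- IndexError): for offset ≥ 0 a zero must occur at or after offset; for a negative offset it
-- must wrap inside the list (offset ≥ -len) and a zero must occur somewhere (the scan wraps
-- past the end of the negative range back to index 0 and covers the whole list).
def Pre_decode_glyph (data : List Int) (offset : Int) : Prop :=
  (0 ≤ offset ∧ (0 : Int) ∈ data.drop offset.toNat) ∨
  (offset < 0 ∧ -(data.length : Int) ≤ offset ∧ (0 : Int) ∈ data)
instance (data : List Int) (offset : Int) : Decidable (Pre_decode_glyph data offset) := by
  unfold Pre_decode_glyph; infer_instance

def pvWitness_decode_glyph : List Int × Int := ([17, 33, 0], 0)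

def Spec_decode_glyph (data : List Int) (offset : Int) (out : List (Int × Int)) : Prop := out = decode_glyph_alt data offset
instance (data : List Int) (offset : Int) (out : List (Int × Int)) : Decidable (Spec_decode_glyph data offset out) := by unfold Spec_decode_glyph; infer_instance

-- ===== CLAIM (what is proved, stated in full; the proofs are below) =====
def Claim_equal_decode_glyph : Prop := ∀ (data : List Int) (offset : Int), Dom_decode_glyph data offset → Pre_decode_glyph data offset → Spec_decode_glyph data offset (decode_glyph data offset)

-- ===== LEMMAS AND PROOFS =====

theorem readDeltas_acc (data : List Int) (fuel : Nat) :
    ∀ (ptr : Int) (acc : List (Int × Int)),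
      readDeltas data fuel ptr acc = acc ++ readDeltas data fuel ptr [] := by
  induction fuel with
  | zero => intro ptr acc; simp [readDeltas]
  | succ n ih =>
    intro ptr acc
    simp only [readDeltas]
    cases h : PySem.List.pyGet? data ptr with
    | none => simp
    | some b =>
      by_cases hb : b = 0
      · simp [hb]
      · simp only [hb, if_false]
        cases ht : PySem.List.pyGet? DIR_TABLE (PySem.Int.band b 15) with
        | none => simp
        | some p =>
          cases p with
          | mk dx dy =>
            simp only [List.nil_append]
            rw [ih, ih (ptr + 1) [(dx * PySem.Int.band (b >>> 4) 15, dy * PySem.Int.band (b >>> 4) 15)]]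
            simp

theorem loopA_eq (data : List Int) (fuel : Nat) :
    ∀ (ptr x y : Int) (path : List (Int × Int)),
      decodeGlyphLoopA data fuel ptr x y path =
        path ++ scanDeltas (readDeltas data fuel ptr []) x y := by
  induction fuel with
  | zero => intro ptr x y path; simp [decodeGlyphLoopA, readDeltas, scanDeltas]
  | succ n ih =>
    intro ptr x y path
    simp only [decodeGlyphLoopA, readDeltas]
    cases h : PySem.List.pyGet? data ptr with
    | none => simp [scanDeltas]
    | some b =>
      by_cases hb : b = 0
      · simp [hb, scanDeltas]
      · simp only [hb, if_false]
        cases ht : PySem.List.pyGet? DIR_TABLE (PySem.Int.band b 15) with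
        | none => simp [scanDeltas]
        | some p =>
          cases p with
          | mk dx dy =>
            simp only [List.nil_append]
            rw [ih, readDeltas_acc data n (ptr + 1) [(dx * PySem.Int.band (b >>> 4) 15, dy * PySem.Int.band (b >>> 4) 15)]]
            simp [scanDeltas]

-- ===== VERDICT (by name: the statement is the Claim_ definition above) =====
theorem decode_glyph_spec : Claim_equal_decode_glyph := by
  intro data offset _ _
  unfold Spec_decode_glyph decode_glyph decode_glyph_alt
  rw [loopA_eq]
  simp
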